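-- pv_equiv track=rewrite | github.com/u-eff-gee/alpaca | python/alpaca/inversion_by_piecewise_interpolation.py | find_indices_of_extrema
-- ===== SOURCE A (Python) =====
-- def find_indices_of_extrema(y):
--     """Find the positions of local extrema in a list of numbers
--
--     In a list with :math:`N` entries, a local minimum is defined by
--
--     ..math:: x_{i-1} > x_i < x_{i+1}
--
--     ..math:: 0 < i < N-1.
--
--     The corner points :math:`x_0` and :math:`x_{N-1}` do not count as local extrema.
--     The condition for a local maximum is:
--
--     ..math:: x_{i-1} < x_i > x_{i+1}.
--
--     Whenever one of the two sets of inequalities is fulfilled, this function will report the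
--     index :math:`i`.
--     In the special case that
--
--     ..math:: x_i = x_{i+1},
--
--     this function will test the inequality
--
--     ..math:: x_{i-1} > x_i < x_{j}
--
--     for all
--
--     ..math:: i+1 < j < N-1
--
--     instead, until an element of the list is encountered that is different from :math:`x_i`.
--     In other words, equal elements in the list are skipped in the search for extrema.
--     Note that if
--
--     ..math:: x_i = x_{N-1}
--
--     for
--
--     ..math:: i < N-1,
--
--     then there is no extremum with an index larger or equal to :math:`i`.
--
--     Parameters:
--     -----------
--     y: list of int or float
--         (One-dimensional) List of numbers.
--
--     Returns:
--     --------
--     list of int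
--         List of indices of local extrema.
--     """
--     indices = []
--     last = 0
--     this = 1
--     next = 2
--     while next < len(y):
--         if y[this] == y[next]:
--             next += 1
--             continue
--         if y[this] > y[last]:
--             if y[this] > y[next]:
--                 indices.append(this)
--         elif y[this] < y[last]:
--             if y[this] < y[next]:
--                 indices.append(this)
--         last = this
--         this = next
--         next += 1
--
--     return indices
-- ===== SOURCE B (Python) =====
-- def find_indices_of_extrema(y):
--     # Run-length compress y into (first_index, value) pairs, then test interior runs.
--     runs = []
--     for i, v in enumerate(y):
--         if not runs or runs[-1][1] != v:
--             runs.append((i, v))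
--     indices = []
--     for (_, pv), (ci, cv), (_, nv) in zip(runs, runs[1:], runs[2:]):
--         if (pv < cv and nv < cv) or (cv < pv and cv < nv):
--             indices.append(ci)
--     return indices
-- ===== Notes on version B (the rewrite author's own statement) =====
-- stated objective: simpler
-- what changed: Replaces A's three-cursor while-loop with plateau-skipping by a two-phase decomposition: run-length compress y into (first_index, value) pairs, then report the middle index of each strictly-peaked or strictly-valleyed consecutive run triple.
import Mathlib
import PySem

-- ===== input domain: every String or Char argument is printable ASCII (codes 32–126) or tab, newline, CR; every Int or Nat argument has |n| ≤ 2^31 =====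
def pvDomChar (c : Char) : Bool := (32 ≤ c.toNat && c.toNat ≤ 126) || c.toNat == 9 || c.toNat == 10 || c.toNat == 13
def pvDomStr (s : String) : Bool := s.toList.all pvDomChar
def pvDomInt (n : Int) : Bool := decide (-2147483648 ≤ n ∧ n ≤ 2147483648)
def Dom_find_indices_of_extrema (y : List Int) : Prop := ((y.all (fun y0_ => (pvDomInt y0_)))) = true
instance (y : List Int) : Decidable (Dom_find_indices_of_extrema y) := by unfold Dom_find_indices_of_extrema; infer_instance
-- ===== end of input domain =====

-- B re-implements A by run-length compression followed by a scan over consecutive run triples (simpler decomposition, same cost).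

-- ===== PORT A =====
-- A's while-loop over indices last/this/next; next increments each iteration, so recursion on y.length - next.
def pvALoop (y : List Int) (last this next : Nat) (acc : List Int) : List Int :=
  if _h : next < y.length then
    if y.getD this 0 = y.getD next 0 then
      pvALoop y last this (next + 1) acc
    else
      let acc' :=
        if y.getD this 0 > y.getD last 0 then
          (if y.getD this 0 > y.getD next 0 then acc ++ [(this : Int)] else acc)
        else if y.getD this 0 < y.getD last 0 then
          (if y.getD this 0 < y.getD next 0 then acc ++ [(this : Int)] else acc)
        else acc
      pvALoop y this next (next + 1) acc'
  else acc
termination_by y.length - next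

def find_indices_of_extrema (y : List Int) : List Int := pvALoop y 0 1 2 []

-- ===== PORT B =====
-- run-length compression: (first_index, value) of each maximal run of equal consecutive values
def pvRuns : List Int → Int → Option Int → List (Int × Int)
  | [], _, _ => []
  | v :: t, i, lastv =>
    if lastv = some v then pvRuns t (i + 1) lastv
    else (i, v) :: pvRuns t (i + 1) (some v)

-- scan over consecutive triples of runs (zip runs runs[1:] runs[2:])
def pvTriples : List (Int × Int) → List Int
  | (_, pv) :: (ci, cv) :: (ni, nv) :: rest =>
    (if (pv < cv ∧ nv < cv) ∨ (cv < pv ∧ cv < nv) then [ci] else []) ++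
      pvTriples ((ci, cv) :: (ni, nv) :: rest)
  | _ => []

def find_indices_of_extrema_alt (y : List Int) : List Int :=
  pvTriples (pvRuns y 0 none)

-- ===== PRECONDITION & SPEC =====
def Spec_find_indices_of_extrema (y : List Int) (out : List Int) : Prop := out = find_indices_of_extrema_alt y
instance (y : List Int) (out : List Int) : Decidable (Spec_find_indices_of_extrema y out) := by unfold Spec_find_indices_of_extrema; infer_instance

-- ===== CLAIM (what is proved, stated in full; the proofs are below) =====
def Claim_equal_find_indices_of_extrema : Prop := ∀ (y : List Int), Dom_find_indices_of_extrema y → Spec_find_indices_of_extrema y (find_indices_of_extrema y)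

-- ===== LEMMAS AND PROOFS =====

-- the first run's index is never reported
lemma pvTriples_head_idx (i j pv : Int) (rest : List (Int × Int)) :
    pvTriples ((i, pv) :: rest) = pvTriples ((j, pv) :: rest) := by
  match rest with
  | [] => rfl
  | [_] => rfl
  | (ci, cv) :: (ni, nv) :: r => simp [pvTriples]

-- a second "run" with the same value as the first is transparent
lemma pvTriples_dup (i j pv : Int) (rest : List (Int × Int)) :
    pvTriples ((i, pv) :: (j, pv) :: rest) = pvTriples ((i, pv) :: rest) := by
  match rest with
  | [] => rfl
  | (ni, nv) :: r =>
    simp only [pvTriples]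
    rw [pvTriples_head_idx j i pv]
    simp

-- main invariant: A's loop from state (last, this, next, acc) computes acc followed by the
-- triple-scan over a dummy previous run of value y[last], the current run headed at `this`,
-- and the runs of the unscanned suffix y[next:]
lemma pvALoop_eq (y : List Int) (fuel : Nat) :
    ∀ (next last this : Nat) (acc : List Int), y.length - next ≤ fuel →
      pvALoop y last this next acc =
        acc ++ pvTriples ((0, y.getD last 0) :: ((this : Int), y.getD this 0) ::
          pvRuns (y.drop next) ((next : Int)) (some (y.getD this 0))) := by
  induction fuel with
  | zero =>
    intro next last this acc hle
    have hge : y.length ≤ next := by omega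
    rw [pvALoop]
    simp [Nat.not_lt.mpr hge, List.drop_eq_nil_of_le hge, pvRuns, pvTriples]
  | succ n ih =>
    intro next last this acc hle
    by_cases h : next < y.length
    · have hdrop : y.drop next = y[next] :: y.drop (next + 1) :=
        List.drop_eq_getElem_cons h
      have hgetD : y.getD next 0 = y[next] := List.getD_eq_getElem y 0 h
      have hcast : ((next + 1 : Nat) : Int) = (next : Int) + 1 := by push_cast; ring
      rw [pvALoop]
      simp only [h, dif_pos]
      by_cases heq : y.getD this 0 = y.getD next 0
      · rw [if_pos heq, ih (next + 1) last this acc (by omega)]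
        rw [hdrop, pvRuns, if_pos (by rw [heq, hgetD]), hcast]
      · rw [if_neg heq, ih (next + 1) this next _ (by omega)]
        have hne : ¬ (some (y.getD this 0) = some y[next]) := by
          simp only [Option.some.injEq]; rw [← hgetD]; exact heq
        conv_rhs => rw [hdrop, pvRuns, if_neg hne]
        conv_rhs => rw [pvTriples]
        rw [pvTriples_head_idx ((this : Int)) 0 (y.getD this 0)]
        rw [hcast, ← hgetD]
        clear ih hdrop hne hcast hle
        split_ifs <;> first | (exfalso; omega) | simp
    · have hge : y.length ≤ next := by omega
      rw [pvALoop]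
      simp [Nat.not_lt.mpr hge, List.drop_eq_nil_of_le hge, pvRuns, pvTriples]

-- B's run list matches the initial state of A's loop
lemma pvRuns_head (y : List Int) :
    pvTriples (pvRuns y 0 none) =
      pvTriples ((0, y.getD 0 0) :: ((1 : Int), y.getD 1 0) ::
        pvRuns (y.drop 2) (2 : Int) (some (y.getD 1 0))) := by
  match y with
  | [] => rfl
  | [a] => rfl
  | a :: b :: t =>
    by_cases hab : a = b
    · subst hab
      show pvTriples (pvRuns (a :: a :: t) 0 none) = _
      rw [pvRuns, if_neg (by simp), pvRuns, if_pos rfl]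
      rw [show ((a :: a :: t : List Int).drop 2) = t from rfl]
      rw [show ((a :: a :: t : List Int).getD 0 0) = a from rfl]
      rw [show ((a :: a :: t : List Int).getD 1 0) = a from rfl]
      rw [pvTriples_dup 0 1 a]
      norm_num
    · rw [pvRuns, if_neg (by simp), pvRuns, if_neg (by simp [hab])]
      rfl

-- ===== VERDICT (by name: the statement is the Claim_ definition above) =====
theorem find_indices_of_extrema_spec : Claim_equal_find_indices_of_extrema := by
  intro y _
  unfold Spec_find_indices_of_extrema find_indices_of_extrema find_indices_of_extrema_alt
  rw [pvALoop_eq y (y.length) 2 0 1 [] (by omega)]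
  rw [pvRuns_head y]
  norm_num
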